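-- pv_equiv track=rewrite | github.com/felicielevinton/extraction | extraction_utils.py | associate_tones_and_triggers
-- ===== SOURCE A (Python) =====
-- def associate_tones_and_triggers(tones, triggers):
--
--     # Create an empty list to store associations
--     associations = []
--
--     # Iterate over each subarray of tones
--     for block_tones in tones:
--         # Get the length of the current subarray
--         subarray_length = len(block_tones)
--
--         # Take the corresponding triggers for the current subarray
--         subarray_triggers = triggers[:subarray_length]
--
--         # Associate triggers with tones in a dictionary
--         subarray_associations = dict(zip(block_tones, subarray_triggers))
--
--         # Add associations for the current subarray to the list
--         associations.append(subarray_associations)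
--
--         # Remove the triggers used for this subarray
--         triggers = triggers[subarray_length:]
--     return associations
-- ===== SOURCE B (Python) =====
-- def associate_tones_and_triggers(tones, triggers):
--     it = iter(triggers)
--     return [dict(zip(block, it)) for block in tones]
-- ===== Notes on version B (the rewrite author's own statement) =====
-- stated objective: faster
-- what changed: B feeds all blocks from one shared iterator over triggers (dict(zip(block, it))) so each trigger is consumed once, instead of A's re-slicing triggers[:n] and triggers[n:] into fresh lists for every block.
import Mathlib
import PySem

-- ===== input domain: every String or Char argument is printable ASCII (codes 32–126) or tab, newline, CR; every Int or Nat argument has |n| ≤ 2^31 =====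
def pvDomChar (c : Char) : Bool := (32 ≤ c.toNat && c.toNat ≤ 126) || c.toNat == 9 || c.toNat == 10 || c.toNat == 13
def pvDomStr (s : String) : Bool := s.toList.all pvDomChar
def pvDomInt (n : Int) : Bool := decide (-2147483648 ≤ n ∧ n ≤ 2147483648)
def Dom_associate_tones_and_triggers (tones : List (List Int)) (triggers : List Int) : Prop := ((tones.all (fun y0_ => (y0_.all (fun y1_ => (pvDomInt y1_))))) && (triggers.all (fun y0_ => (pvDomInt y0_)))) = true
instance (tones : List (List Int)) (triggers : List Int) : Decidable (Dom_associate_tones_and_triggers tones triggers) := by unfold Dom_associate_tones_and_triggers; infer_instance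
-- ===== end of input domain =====

-- B replaces A's repeated slicing of `triggers` (quadratic copying) by a single
-- shared iterator consumed by zip, one pass over the triggers in total.

-- ===== PORT A =====
-- A: for each block, slice triggers[:len], build dict(zip(block, slice)), append its
-- items, then rebind triggers to triggers[len:]; state = (associations, triggers).
def associate_tones_and_triggers (tones : List (List Int)) (triggers : List Int) : List (List (Int × Int)) :=
  (tones.foldl
    (fun (st : List (List (Int × Int)) × List Int) block_tones =>
      let subarray_length : Int := block_tones.length
      let subarray_triggers := PySem.List.slice st.2 none (some subarray_length)
      let subarray_associations := PySem.Dict.ofList (block_tones.zip subarray_triggers)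
      (st.1 ++ [subarray_associations.items], PySem.List.slice st.2 (some subarray_length) none))
    ([], triggers)).1

-- ===== PORT B =====
-- B: zip(block, it) — walk block and the remaining triggers together, inserting into
-- the dict, and return the unconsumed triggers for the next block.
def pvZipIter (block rest : List Int) (d : PySem.Dict Int Int) : PySem.Dict Int Int × List Int :=
  match block, rest with
  | [], r => (d, r)
  | _ :: _, [] => (d, [])
  | t :: bs, r :: rs => pvZipIter bs rs (d.insert t r)

def associate_tones_and_triggers_alt (tones : List (List Int)) (triggers : List Int) : List (List (Int × Int)) :=
  match tones with
  | [] => []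
  | block :: rest =>
    let p := pvZipIter block triggers PySem.Dict.empty
    p.1.items :: associate_tones_and_triggers_alt rest p.2

-- ===== PRECONDITION & SPEC =====
def Spec_associate_tones_and_triggers (tones : List (List Int)) (triggers : List Int) (out : List (List (Int × Int))) : Prop := out = associate_tones_and_triggers_alt tones triggers
instance (tones : List (List Int)) (triggers : List Int) (out : List (List (Int × Int))) : Decidable (Spec_associate_tones_and_triggers tones triggers out) := by unfold Spec_associate_tones_and_triggers; infer_instance

-- ===== CLAIM (what is proved, stated in full; the proofs are below) =====
def Claim_equal_associate_tones_and_triggers : Prop := ∀ (tones : List (List Int)) (triggers : List Int), Dom_associate_tones_and_triggers tones triggers → Spec_associate_tones_and_triggers tones triggers (associate_tones_and_triggers tones triggers)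

-- ===== LEMMAS AND PROOFS =====

-- zip truncates at the shorter list, so pre-truncating the triggers changes nothing
theorem pv_zip_take (b r : List Int) : b.zip (r.take b.length) = b.zip r := by
  induction b generalizing r with
  | nil => simp
  | cons x xs ih =>
    cases r with
    | nil => simp
    | cons y ys => simp [List.zip_cons_cons, ih]

-- B's simultaneous walk = fold of insert over the zip (A's dict build)
theorem pvZipIter_fst (b r : List Int) (d : PySem.Dict Int Int) :
    (pvZipIter b r d).1 = (b.zip r).foldl (fun acc p => acc.insert p.1 p.2) d := by
  induction b generalizing r d with
  | nil => simp [pvZipIter]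
  | cons x xs ih =>
    cases r with
    | nil => simp [pvZipIter]
    | cons y ys => simp [pvZipIter, List.zip_cons_cons, ih]

-- B's leftover triggers = A's triggers[len:]
theorem pvZipIter_snd (b r : List Int) (d : PySem.Dict Int Int) :
    (pvZipIter b r d).2 = r.drop b.length := by
  induction b generalizing r d with
  | nil => simp [pvZipIter]
  | cons x xs ih =>
    cases r with
    | nil => simp [pvZipIter]
    | cons y ys => simp [pvZipIter, ih]

-- A's fold, with an arbitrary accumulated prefix, computes B's recursion
theorem pv_foldl_eq_alt (tones : List (List Int)) (triggers : List Int)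
    (acc : List (List (Int × Int))) :
    (tones.foldl
      (fun (st : List (List (Int × Int)) × List Int) block_tones =>
        let subarray_length : Int := block_tones.length
        let subarray_triggers := PySem.List.slice st.2 none (some subarray_length)
        let subarray_associations := PySem.Dict.ofList (block_tones.zip subarray_triggers)
        (st.1 ++ [subarray_associations.items], PySem.List.slice st.2 (some subarray_length) none))
      (acc, triggers)).1
    = acc ++ associate_tones_and_triggers_alt tones triggers := by
  induction tones generalizing triggers acc with
  | nil => simp [associate_tones_and_triggers_alt]
  | cons b bs ih =>
    simp only [List.foldl_cons, associate_tones_and_triggers_alt]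
    rw [ih]
    rw [PySem.List.slice_to_natCast, PySem.List.slice_from_natCast,
        pv_zip_take, pvZipIter_snd]
    simp [PySem.Dict.ofList, PySem.Dict.update, pvZipIter_fst]

-- ===== VERDICT (by name: the statement is the Claim_ definition above) =====
theorem associate_tones_and_triggers_spec : Claim_equal_associate_tones_and_triggers := by
  intro tones triggers _
  show associate_tones_and_triggers tones triggers = _
  unfold associate_tones_and_triggers
  rw [pv_foldl_eq_alt]
  simp
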